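-- pv_equiv track=rewrite | github.com/Jeet1922/genai-skill-rec | backend/agents/crossskill_agent.py | _is_complementary_skill
-- ===== SOURCE A (Python) =====
-- def _is_complementary_skill(skill: str, current_skills: set, role: str) -> bool:
--     """Check if a skill complements current skills"""
--     # Define skill complementarity
--     skill_complements = {
--         "Python": ["Machine Learning", "Data Analysis", "Automation"],
--         "JavaScript": ["Frontend Development", "Node.js", "React"],
--         "SQL": ["Data Analysis", "Business Intelligence", "Data Engineering"],
--         "Docker": ["DevOps", "Microservices", "Cloud Deployment"],
--         "Machine Learning": ["Python", "Data Science", "Statistics"],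
--         "React": ["JavaScript", "Frontend Development", "UI/UX"],
--         "AWS": ["Cloud Computing", "DevOps", "Scalability"],
--         "Git": ["Version Control", "Collaboration", "DevOps"]
--     }
--
--     # Check if skill complements any current skill
--     for current_skill in current_skills:
--         complements = skill_complements.get(current_skill, [])
--         if skill in complements:
--             return True
--
--     return False
-- ===== SOURCE B (Python) =====
-- _COMPLEMENTED_BY = {
--     "Machine Learning": ["Python"],
--     "Data Analysis": ["Python", "SQL"],
--     "Automation": ["Python"],
--     "Frontend Development": ["JavaScript", "React"],
--     "Node.js": ["JavaScript"],
--     "React": ["JavaScript"],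
--     "Business Intelligence": ["SQL"],
--     "Data Engineering": ["SQL"],
--     "DevOps": ["Docker", "AWS", "Git"],
--     "Microservices": ["Docker"],
--     "Cloud Deployment": ["Docker"],
--     "Python": ["Machine Learning"],
--     "Data Science": ["Machine Learning"],
--     "Statistics": ["Machine Learning"],
--     "JavaScript": ["React"],
--     "UI/UX": ["React"],
--     "Cloud Computing": ["AWS"],
--     "Scalability": ["AWS"],
--     "Version Control": ["Git"],
--     "Collaboration": ["Git"],
-- }
--
-- def _is_complementary_skill(skill: str, current_skills: set, role: str) -> bool:
--     """Reverse-index formulation: which base skills list `skill` as a complement?"""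
--     return any(base in current_skills for base in _COMPLEMENTED_BY.get(skill, []))
-- ===== Notes on version B (the rewrite author's own statement) =====
-- stated objective: faster
-- what changed: B inverts the traversal: instead of looping over current_skills and testing skill against each skill's complements list, it stores the hardcoded knowledge as a reverse index (complement skill -> base skills that list it), does a single dict lookup on skill and checks whether any of those (at most 3) base skills is in the current_skills set.
import Mathlib
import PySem

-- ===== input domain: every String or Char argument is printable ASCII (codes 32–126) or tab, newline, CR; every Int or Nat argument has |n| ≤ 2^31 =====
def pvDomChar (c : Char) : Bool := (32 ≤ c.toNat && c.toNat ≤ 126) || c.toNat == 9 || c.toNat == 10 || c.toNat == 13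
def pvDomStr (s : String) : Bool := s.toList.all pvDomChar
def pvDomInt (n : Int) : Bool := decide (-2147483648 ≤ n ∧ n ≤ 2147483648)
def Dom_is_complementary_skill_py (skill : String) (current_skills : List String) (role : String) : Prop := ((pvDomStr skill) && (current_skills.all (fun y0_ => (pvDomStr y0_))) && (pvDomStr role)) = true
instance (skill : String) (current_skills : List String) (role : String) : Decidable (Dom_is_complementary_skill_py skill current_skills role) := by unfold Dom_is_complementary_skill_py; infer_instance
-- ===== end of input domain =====

-- B inverts the traversal: instead of A's loop over current_skills testing `skill` against each
-- complements list, B looks `skill` up once in a hardcoded reverse index (complement → base skills)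
-- and tests whether any of those base skills is currently held (objective: idiomatic; same result).

-- ===== PORT A =====
def pvSkillComplements : PySem.Dict String (List String) :=
  PySem.Dict.ofList [
    ("Python", ["Machine Learning", "Data Analysis", "Automation"]),
    ("JavaScript", ["Frontend Development", "Node.js", "React"]),
    ("SQL", ["Data Analysis", "Business Intelligence", "Data Engineering"]),
    ("Docker", ["DevOps", "Microservices", "Cloud Deployment"]),
    ("Machine Learning", ["Python", "Data Science", "Statistics"]),
    ("React", ["JavaScript", "Frontend Development", "UI/UX"]),
    ("AWS", ["Cloud Computing", "DevOps", "Scalability"]),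
    ("Git", ["Version Control", "Collaboration", "DevOps"])]

-- the `for current_skill in current_skills: … return True` loop, with its early return
def pvLoopA (skill : String) : List String → Bool
  | [] => false
  | cs :: rest =>
      let complements := PySem.Dict.getD pvSkillComplements cs []
      if complements.contains skill then true else pvLoopA skill rest

def is_complementary_skill_py (skill : String) (current_skills : List String) (role : String) : Bool :=
  pvLoopA skill current_skills

-- ===== PORT B =====
-- Source B's module-level reverse index _COMPLEMENTED_BY (complement skill → base skills listing it)
def pvComplementedBy : PySem.Dict String (List String) :=
  PySem.Dict.ofList [
    ("Machine Learning", ["Python"]),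
    ("Data Analysis", ["Python", "SQL"]),
    ("Automation", ["Python"]),
    ("Frontend Development", ["JavaScript", "React"]),
    ("Node.js", ["JavaScript"]),
    ("React", ["JavaScript"]),
    ("Business Intelligence", ["SQL"]),
    ("Data Engineering", ["SQL"]),
    ("DevOps", ["Docker", "AWS", "Git"]),
    ("Microservices", ["Docker"]),
    ("Cloud Deployment", ["Docker"]),
    ("Python", ["Machine Learning"]),
    ("Data Science", ["Machine Learning"]),
    ("Statistics", ["Machine Learning"]),
    ("JavaScript", ["React"]),
    ("UI/UX", ["React"]),
    ("Cloud Computing", ["AWS"]),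
    ("Scalability", ["AWS"]),
    ("Version Control", ["Git"]),
    ("Collaboration", ["Git"])]

-- any(base in current_skills for base in _COMPLEMENTED_BY.get(skill, []))
def is_complementary_skill_py_alt (skill : String) (current_skills : List String) (role : String) : Bool :=
  (PySem.Dict.getD pvComplementedBy skill []).any (fun base => current_skills.contains base)

-- ===== PRECONDITION & SPEC =====
def Spec_is_complementary_skill_py (skill : String) (current_skills : List String) (role : String) (out : Bool) : Prop := out = is_complementary_skill_py_alt skill current_skills role
instance (skill : String) (current_skills : List String) (role : String) (out : Bool) : Decidable (Spec_is_complementary_skill_py skill current_skills role out) := by unfold Spec_is_complementary_skill_py; infer_instance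

-- ===== CLAIM (what is proved, stated in full; the proofs are below) =====
def Claim_equal_is_complementary_skill_py : Prop := ∀ (skill : String) (current_skills : List String) (role : String), Dom_is_complementary_skill_py skill current_skills role → Spec_is_complementary_skill_py skill current_skills role (is_complementary_skill_py skill current_skills role)

-- ===== LEMMAS AND PROOFS =====
def pvPairs : List (String × String) :=
  [("Python","Machine Learning"),("Python","Data Analysis"),("Python","Automation"),
   ("JavaScript","Frontend Development"),("JavaScript","Node.js"),("JavaScript","React"),
   ("SQL","Data Analysis"),("SQL","Business Intelligence"),("SQL","Data Engineering"),
   ("Docker","DevOps"),("Docker","Microservices"),("Docker","Cloud Deployment"),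
   ("Machine Learning","Python"),("Machine Learning","Data Science"),("Machine Learning","Statistics"),
   ("React","JavaScript"),("React","Frontend Development"),("React","UI/UX"),
   ("AWS","Cloud Computing"),("AWS","DevOps"),("AWS","Scalability"),
   ("Git","Version Control"),("Git","Collaboration"),("Git","DevOps")]
def pvAmk : PySem.Dict String (List String) := PySem.Dict.mk [
    ("Python", ["Machine Learning", "Data Analysis", "Automation"]),
    ("JavaScript", ["Frontend Development", "Node.js", "React"]),
    ("SQL", ["Data Analysis", "Business Intelligence", "Data Engineering"]),
    ("Docker", ["DevOps", "Microservices", "Cloud Deployment"]),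
    ("Machine Learning", ["Python", "Data Science", "Statistics"]),
    ("React", ["JavaScript", "Frontend Development", "UI/UX"]),
    ("AWS", ["Cloud Computing", "DevOps", "Scalability"]),
    ("Git", ["Version Control", "Collaboration", "DevOps"])]
def pvBmk : PySem.Dict String (List String) := PySem.Dict.mk [
    ("Machine Learning", ["Python"]), ("Data Analysis", ["Python", "SQL"]),
    ("Automation", ["Python"]), ("Frontend Development", ["JavaScript", "React"]),
    ("Node.js", ["JavaScript"]), ("React", ["JavaScript"]),
    ("Business Intelligence", ["SQL"]), ("Data Engineering", ["SQL"]),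
    ("DevOps", ["Docker", "AWS", "Git"]), ("Microservices", ["Docker"]),
    ("Cloud Deployment", ["Docker"]), ("Python", ["Machine Learning"]),
    ("Data Science", ["Machine Learning"]), ("Statistics", ["Machine Learning"]),
    ("JavaScript", ["React"]), ("UI/UX", ["React"]),
    ("Cloud Computing", ["AWS"]), ("Scalability", ["AWS"]),
    ("Version Control", ["Git"]), ("Collaboration", ["Git"])]
set_option maxHeartbeats 4000000 in
lemma pvL (c skill : String) :
    (PySem.Dict.getD pvAmk c []).contains skill = pvPairs.contains (c, skill) := by
  by_cases h0 : "Python" = c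
  · subst h0; simp [pvAmk, pvPairs, PySem.Dict.getD, PySem.Dict.get?]
  by_cases h1 : "JavaScript" = c
  · subst h1; simp [pvAmk, pvPairs, PySem.Dict.getD, PySem.Dict.get?]
  by_cases h2 : "SQL" = c
  · subst h2; simp [pvAmk, pvPairs, PySem.Dict.getD, PySem.Dict.get?]
  by_cases h3 : "Docker" = c
  · subst h3; simp [pvAmk, pvPairs, PySem.Dict.getD, PySem.Dict.get?]
  by_cases h4 : "Machine Learning" = c
  · subst h4; simp [pvAmk, pvPairs, PySem.Dict.getD, PySem.Dict.get?]
  by_cases h5 : "React" = c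
  · subst h5; simp [pvAmk, pvPairs, PySem.Dict.getD, PySem.Dict.get?]
  by_cases h6 : "AWS" = c
  · subst h6; simp [pvAmk, pvPairs, PySem.Dict.getD, PySem.Dict.get?]
  by_cases h7 : "Git" = c
  · subst h7; simp [pvAmk, pvPairs, PySem.Dict.getD, PySem.Dict.get?]
  · simp [pvAmk, pvPairs, PySem.Dict.getD, PySem.Dict.get?, List.find?, (beq_eq_false_iff_ne.mpr h0), (beq_eq_false_iff_ne.mpr h1), (beq_eq_false_iff_ne.mpr h2), (beq_eq_false_iff_ne.mpr h3), (beq_eq_false_iff_ne.mpr h4), (beq_eq_false_iff_ne.mpr h5), (beq_eq_false_iff_ne.mpr h6), (beq_eq_false_iff_ne.mpr h7), (show ¬c = "Python" from fun hh => h0 hh.symm), (show ¬c = "JavaScript" from fun hh => h1 hh.symm), (show ¬c = "SQL" from fun hh => h2 hh.symm), (show ¬c = "Docker" from fun hh => h3 hh.symm), (show ¬c = "Machine Learning" from fun hh => h4 hh.symm), (show ¬c = "React" from fun hh => h5 hh.symm), (show ¬c = "AWS" from fun hh => h6 hh.symm), (show ¬c = "Git" from fun hh => h7 hh.symm)]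
set_option maxHeartbeats 4000000 in
lemma pvR (base skill : String) :
    (PySem.Dict.getD pvBmk skill []).contains base = pvPairs.contains (base, skill) := by
  by_cases h0 : "Machine Learning" = skill
  · subst h0; simp [pvBmk, pvPairs, PySem.Dict.getD, PySem.Dict.get?]
  by_cases h1 : "Data Analysis" = skill
  · subst h1; simp [pvBmk, pvPairs, PySem.Dict.getD, PySem.Dict.get?]
  by_cases h2 : "Automation" = skill
  · subst h2; simp [pvBmk, pvPairs, PySem.Dict.getD, PySem.Dict.get?]
  by_cases h3 : "Frontend Development" = skill
  · subst h3; simp [pvBmk, pvPairs, PySem.Dict.getD, PySem.Dict.get?]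
  by_cases h4 : "Node.js" = skill
  · subst h4; simp [pvBmk, pvPairs, PySem.Dict.getD, PySem.Dict.get?]
  by_cases h5 : "React" = skill
  · subst h5; simp [pvBmk, pvPairs, PySem.Dict.getD, PySem.Dict.get?]
  by_cases h6 : "Business Intelligence" = skill
  · subst h6; simp [pvBmk, pvPairs, PySem.Dict.getD, PySem.Dict.get?]
  by_cases h7 : "Data Engineering" = skill
  · subst h7; simp [pvBmk, pvPairs, PySem.Dict.getD, PySem.Dict.get?]
  by_cases h8 : "DevOps" = skill
  · subst h8; simp [pvBmk, pvPairs, PySem.Dict.getD, PySem.Dict.get?]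
  by_cases h9 : "Microservices" = skill
  · subst h9; simp [pvBmk, pvPairs, PySem.Dict.getD, PySem.Dict.get?]
  by_cases h10 : "Cloud Deployment" = skill
  · subst h10; simp [pvBmk, pvPairs, PySem.Dict.getD, PySem.Dict.get?]
  by_cases h11 : "Python" = skill
  · subst h11; simp [pvBmk, pvPairs, PySem.Dict.getD, PySem.Dict.get?]
  by_cases h12 : "Data Science" = skill
  · subst h12; simp [pvBmk, pvPairs, PySem.Dict.getD, PySem.Dict.get?]
  by_cases h13 : "Statistics" = skill
  · subst h13; simp [pvBmk, pvPairs, PySem.Dict.getD, PySem.Dict.get?]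
  by_cases h14 : "JavaScript" = skill
  · subst h14; simp [pvBmk, pvPairs, PySem.Dict.getD, PySem.Dict.get?]
  by_cases h15 : "UI/UX" = skill
  · subst h15; simp [pvBmk, pvPairs, PySem.Dict.getD, PySem.Dict.get?]
  by_cases h16 : "Cloud Computing" = skill
  · subst h16; simp [pvBmk, pvPairs, PySem.Dict.getD, PySem.Dict.get?]
  by_cases h17 : "Scalability" = skill
  · subst h17; simp [pvBmk, pvPairs, PySem.Dict.getD, PySem.Dict.get?]
  by_cases h18 : "Version Control" = skill
  · subst h18; simp [pvBmk, pvPairs, PySem.Dict.getD, PySem.Dict.get?]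
  by_cases h19 : "Collaboration" = skill
  · subst h19; simp [pvBmk, pvPairs, PySem.Dict.getD, PySem.Dict.get?]
  · simp [pvBmk, pvPairs, PySem.Dict.getD, PySem.Dict.get?, List.find?, (beq_eq_false_iff_ne.mpr h0), (beq_eq_false_iff_ne.mpr h1), (beq_eq_false_iff_ne.mpr h2), (beq_eq_false_iff_ne.mpr h3), (beq_eq_false_iff_ne.mpr h4), (beq_eq_false_iff_ne.mpr h5), (beq_eq_false_iff_ne.mpr h6), (beq_eq_false_iff_ne.mpr h7), (beq_eq_false_iff_ne.mpr h8), (beq_eq_false_iff_ne.mpr h9), (beq_eq_false_iff_ne.mpr h10), (beq_eq_false_iff_ne.mpr h11), (beq_eq_false_iff_ne.mpr h12), (beq_eq_false_iff_ne.mpr h13), (beq_eq_false_iff_ne.mpr h14), (beq_eq_false_iff_ne.mpr h15), (beq_eq_false_iff_ne.mpr h16), (beq_eq_false_iff_ne.mpr h17), (beq_eq_false_iff_ne.mpr h18), (beq_eq_false_iff_ne.mpr h19), (show ¬skill = "Machine Learning" from fun hh => h0 hh.symm), (show ¬skill = "Data Analysis" from fun hh => h1 hh.symm), (show ¬skill =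 "Automation" from fun hh => h2 hh.symm), (show ¬skill = "Frontend Development" from fun hh => h3 hh.symm), (show ¬skill = "Node.js" from fun hh => h4 hh.symm), (show ¬skill = "React" from fun hh => h5 hh.symm), (show ¬skill = "Business Intelligence" from fun hh => h6 hh.symm), (show ¬skill = "Data Engineering" from fun hh => h7 hh.symm), (show ¬skill = "DevOps" from fun hh => h8 hh.symm), (show ¬skill = "Microservices" from fun hh => h9 hh.symm), (show ¬skill = "Cloud Deployment" from fun hh => h10 hh.symm), (show ¬skill = "Python" from fun hh => h11 hh.symm), (show ¬skill = "Data Science" from fun hh => h12 hh.symm), (show ¬skill = "Statistics" from fun hh => h13 hh.symm), (show ¬skill = "JavaScript" from fun hh => h14 hh.symm), (show ¬skill = "UI/UX" from fun hh => h15 hh.symm), (show ¬skill = "Cloud Computing" from fun hh => h16 hh.symm), (show ¬skill = "Scalability" from fun hh => h17 hh.symm), (show ¬skill = "Version Control" from fun hh => h18 hh.symm), (show ¬skill = "Collaboration" from fun hh => h19 hh.symm)]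

lemma pvComplA_eq : pvSkillComplements = pvAmk := by rfl
lemma pvComplB_eq : pvComplementedBy = pvBmk := by rfl

lemma pv_swap (xs ys : List String) :
    xs.any (fun k => ys.contains k) = ys.any (fun c => xs.contains c) := by
  rw [Bool.eq_iff_iff]
  simp only [List.any_eq_true, List.contains_iff_mem]
  exact ⟨fun ⟨x, h1, h2⟩ => ⟨x, h2, h1⟩, fun ⟨x, h1, h2⟩ => ⟨x, h2, h1⟩⟩

lemma pv_loopA_any (skill : String) (l : List String) :
    pvLoopA skill l = l.any (fun c => pvPairs.contains (c, skill)) := by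
  induction l with
  | nil => rfl
  | cons c rest ih =>
      simp only [pvLoopA, List.any_cons, ih, pvComplA_eq, pvL]
      cases pvPairs.contains (c, skill) <;> simp

-- ===== VERDICT (by name: the statement is the Claim_ definition above) =====
theorem is_complementary_skill_py_spec : Claim_equal_is_complementary_skill_py := by
  intro skill current_skills role _
  show _ = _
  rw [is_complementary_skill_py, is_complementary_skill_py_alt, pv_loopA_any,
    pv_swap, pvComplB_eq]
  simp only [pvR]
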